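-- pv_equiv track=rewrite | github.com/tobeyOguney/Zoo-of-Algorithms | Max Sum Increasing Subsequence/solution.py | get_subsq
-- ===== SOURCE A (Python) =====
-- def get_subsq(memo, lis):
--     idx = memo.index(max(memo))
--     subsq = [lis[idx]]
--
--     for i in range(idx)[::-1]:
--         if lis[i] < lis[idx] and memo[i] == memo[idx] - lis[idx]:
--             subsq.append(lis[i])
--             idx = i
--
--     return subsq[::-1]
-- ===== SOURCE B (Python) =====
-- def get_subsq(memo, lis):
--     idx = memo.index(max(memo))
--
--     def build(j):
--         # increasing subsequence of maximal sum ending at index j,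
--         # following the memo backwards to the predecessor
--         for i in range(j - 1, -1, -1):
--             if lis[i] < lis[j] and memo[i] == memo[j] - lis[j]:
--                 return build(i) + [lis[j]]
--         return [lis[j]]
--
--     return build(idx)
-- ===== Notes on version B (the rewrite author's own statement) =====
-- stated objective: alternative
-- what changed: Replaces A's mutating loop (appending backwards into a list and reversing at the end) with a recursive path-following reconstruction build(j) that returns the subsequence ending at j already in forward order, so the explicit reverse and the mutable idx/subsq state disappear.
import Mathlib
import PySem

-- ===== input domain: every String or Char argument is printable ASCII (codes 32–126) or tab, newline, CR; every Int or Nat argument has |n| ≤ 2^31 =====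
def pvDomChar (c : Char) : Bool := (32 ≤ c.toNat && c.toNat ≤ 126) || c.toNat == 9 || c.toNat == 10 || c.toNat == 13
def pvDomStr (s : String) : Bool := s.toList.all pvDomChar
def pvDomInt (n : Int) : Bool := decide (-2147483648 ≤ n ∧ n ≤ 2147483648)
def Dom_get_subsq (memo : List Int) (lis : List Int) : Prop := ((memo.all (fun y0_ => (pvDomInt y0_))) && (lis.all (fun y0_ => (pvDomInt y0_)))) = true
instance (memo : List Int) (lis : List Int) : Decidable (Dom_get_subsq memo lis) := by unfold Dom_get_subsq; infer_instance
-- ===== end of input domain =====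

-- B replaces A's mutating backwards loop + final reverse by a recursive
-- path-following reconstruction that builds the answer in forward order
-- (objective: alternative decomposition, same cost).

-- ===== PORT A =====
-- Literal port of A.  idx = memo.index(max(memo)); subsq = [lis[idx]];
-- for i in range(idx)[::-1]: …; return subsq[::-1].
-- On inputs excluded by Pre_ (memo empty: ValueError; idx out of range of
-- lis: IndexError) Python raises; the port returns [] there (unclaimed).
-- Inside Pre_ every index accessed in the loop is in range, so List.getD is exact.
def get_subsq (memo : List Int) (lis : List Int) : List Int :=
  match PySem.List.max? memo (fun y => y) with
  | none => []       -- max([]) raises ValueError (outside Pre_)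
  | some m =>
    match PySem.List.index? memo m with
    | none => []     -- unreachable: the max is a member
    | some idx =>
      match PySem.List.pyGet? lis (idx : Int) with
      | none => []   -- lis[idx] raises IndexError (outside Pre_)
      | some v =>
        let st :=
          ((List.range idx).reverse).foldl
            (fun (st : Nat × List Int) i =>
              if lis.getD i 0 < lis.getD st.1 0 ∧
                 memo.getD i 0 = memo.getD st.1 0 - lis.getD st.1 0
              then (i, st.2 ++ [lis.getD i 0]) else st)
            (idx, [v])
        st.2.reverse

-- ===== PORT B =====
-- B's recursive helper: the increasing subsequence of maximal sum ending at
-- index j, found by scanning i = j-1 … 0 for the first valid predecessor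
-- (for i in range(j-1,-1,-1): if …: return build(i)+[lis[j]]; return [lis[j]]).
def pvBuild (memo : List Int) (lis : List Int) (j : Nat) : List Int :=
  match h : ((List.range j).reverse).find?
      (fun i => decide (lis.getD i 0 < lis.getD j 0 ∧
                        memo.getD i 0 = memo.getD j 0 - lis.getD j 0)) with
  | some i => pvBuild memo lis i ++ [lis.getD j 0]
  | none => [lis.getD j 0]
termination_by j
decreasing_by
  have hm := List.mem_of_find?_eq_some h
  simp [List.mem_reverse, List.mem_range] at hm
  exact hm

def get_subsq_alt (memo : List Int) (lis : List Int) : List Int :=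
  match PySem.List.max? memo (fun y => y) with
  | none => []
  | some m =>
    match PySem.List.index? memo m with
    | none => []
    | some idx => pvBuild memo lis idx

-- ===== PRECONDITION & SPEC =====
-- first index of the maximum of memo (0 for empty memo)
def pvArgmax (memo : List Int) : Nat :=
  match PySem.List.max? memo (fun y => y) with
  | none => 0
  | some m => (PySem.List.index? memo m).getD 0

-- Exactly the inputs on which A returns: memo nonempty (else max([]) raises
-- ValueError) and the argmax index in range of lis (else lis[idx] raises
-- IndexError); every other access A makes is then in range.
def Pre_get_subsq (memo : List Int) (lis : List Int) : Prop :=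
  memo ≠ [] ∧ pvArgmax memo < lis.length
instance (memo : List Int) (lis : List Int) : Decidable (Pre_get_subsq memo lis) := by
  unfold Pre_get_subsq; infer_instance

def pvWitness_get_subsq : List Int × List Int := ([1, 3, 4, 3], [1, 2, 1, 5])

def Spec_get_subsq (memo : List Int) (lis : List Int) (out : List Int) : Prop := out = get_subsq_alt memo lis
instance (memo : List Int) (lis : List Int) (out : List Int) : Decidable (Spec_get_subsq memo lis out) := by unfold Spec_get_subsq; infer_instance

-- ===== CLAIM (what is proved, stated in full; the proofs are below) =====
def Claim_equal_get_subsq : Prop := ∀ (memo : List Int) (lis : List Int), Dom_get_subsq memo lis → Pre_get_subsq memo lis → Spec_get_subsq memo lis (get_subsq memo lis)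

-- ===== LEMMAS AND PROOFS =====

-- the elements A's loop appends while scanning indices k-1 … 0 with current idx j
def pvRib (memo : List Int) (lis : List Int) (j k : Nat) : List Int :=
  match h : ((List.range k).reverse).find?
      (fun i => decide (lis.getD i 0 < lis.getD j 0 ∧
                        memo.getD i 0 = memo.getD j 0 - lis.getD j 0)) with
  | some i => lis.getD i 0 :: pvRib memo lis i i
  | none => []
termination_by k
decreasing_by
  have hm := List.mem_of_find?_eq_some h
  simp [List.mem_reverse, List.mem_range] at hm
  exact hm

lemma range_succ_reverse (k : Nat) :
    (List.range (k + 1)).reverse = k :: (List.range k).reverse := by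
  simp [List.range_succ]

-- A's fold appends exactly pvRib
lemma foldA_eq (memo lis : List Int) :
    ∀ (k j : Nat) (acc : List Int),
      (((List.range k).reverse).foldl
        (fun (st : Nat × List Int) i =>
          if lis.getD i 0 < lis.getD st.1 0 ∧
             memo.getD i 0 = memo.getD st.1 0 - lis.getD st.1 0
          then (i, st.2 ++ [lis.getD i 0]) else st)
        (j, acc)).2 = acc ++ pvRib memo lis j k := by
  intro k
  induction k with
  | zero => intro j acc; rw [pvRib]; simp
  | succ k ih =>
    intro j acc
    rw [range_succ_reverse, List.foldl_cons, pvRib, range_succ_reverse]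
    by_cases hc : lis.getD k 0 < lis.getD j 0 ∧
        memo.getD k 0 = memo.getD j 0 - lis.getD j 0
    · rw [List.find?_cons_of_pos (p := _) (by simpa using hc)]
      simp only [if_pos hc]
      rw [ih k (acc ++ [lis.getD k 0])]
      simp
    · rw [List.find?_cons_of_neg (p := _) (by simpa using hc)]
      simp only [if_neg hc]
      rw [ih j acc, pvRib]

-- B's build is [ … pvRib reversed … , lis[j] ]
lemma build_eq (memo lis : List Int) :
    ∀ j, pvBuild memo lis j = (pvRib memo lis j j).reverse ++ [lis.getD j 0] := by
  intro j
  induction j using Nat.strong_induction_on with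
  | _ j ih =>
    rw [pvBuild, pvRib]
    cases h : ((List.range j).reverse).find?
        (fun i => decide (lis.getD i 0 < lis.getD j 0 ∧
                          memo.getD i 0 = memo.getD j 0 - lis.getD j 0)) with
    | none => simp
    | some i =>
      have hm := List.mem_of_find?_eq_some h
      simp [List.mem_reverse, List.mem_range] at hm
      simp [ih i hm]

-- ===== VERDICT (by name: the statement is the Claim_ definition above) =====
theorem get_subsq_spec : Claim_equal_get_subsq := by
  intro memo lis _ hpre
  obtain ⟨hne, hlt⟩ := hpre
  unfold Spec_get_subsq get_subsq get_subsq_alt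
  cases hmax : PySem.List.max? memo (fun y => y) with
  | none => exact absurd ((PySem.List.max?_eq_none_iff _ _).mp hmax) hne
  | some m =>
    have hmem : m ∈ memo := PySem.List.max?_mem hmax
    cases hidx : PySem.List.index? memo m with
    | none =>
      rw [PySem.List.index?_eq_none_iff _ _] at hidx
      exact absurd hmem hidx
    | some idx =>
      have hargm : pvArgmax memo = idx := by
        unfold pvArgmax; rw [hmax]; simp only []; rw [hidx]; rfl
      have hlt' : idx < lis.length := hargm ▸ hlt
      simp only []
      rw [hidx]
      simp only []
      rw [PySem.List.pyGet?_natCast, List.getElem?_eq_getElem hlt']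
      simp only []
      rw [foldA_eq memo lis idx idx, build_eq]
      have hg : lis[idx] = lis.getD idx 0 := (List.getD_eq_getElem _ _ hlt').symm
      simp [hg]
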